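-- pv_equiv track=rewrite | github.com/jereneal20/competitive-programming | hackercup/2018-1r/let_it_flow.py | let_it_flow
-- ===== SOURCE A (Python) =====
-- def let_it_flow(arr, nol):
--     if nol % 2 == 1:
--         return 0
--     if '#' in arr[1]:
--         return 0
--     for idx in range(nol):
--         if arr[0][idx] == arr[2][idx] == '#':
--             return 0
--     if arr[0][0] == '#' or arr[1][0] == '#':
--         return 0
--     if nol >= 2 and (arr[1][-1] == '#' or arr[2][-1] == '#'):
--         return 0
--
--     idx = 1
--     count = 1
--     while idx < nol - 1:
--         if arr[0][idx] == '#' and arr[2][idx + 1] == '#':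
--             return 0
--         if arr[2][idx] == '#' and arr[0][idx + 1] == '#':
--             return 0
--         if arr[0][idx] == '#' or arr[2][idx] == '#' or \
--             arr[0][idx + 1] == '#' or arr[2][idx + 1] == '#':
--             pass
--         else:
--             count *= 2
--         count %= 1000000007
--         idx += 2
--
--     return count
-- ===== SOURCE B (Python) =====
-- def let_it_flow(arr, nol):
--     # Bit-parallel reformulation: encode the '#' cells of the top and bottom rows
--     # (first nol columns) as integer bitmasks and evaluate every column conflict,
--     # cross conflict and free-pair count with whole-word bitwise operations.
--     if nol % 2 == 1:
--         return 0
--     if '#' in arr[1]: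
--         return 0
--     top, mid, bot = arr[0], arr[1], arr[2]
--     if top[0] == '#' or mid[0] == '#':
--         return 0
--     if nol >= 2 and (mid[-1] == '#' or bot[-1] == '#'):
--         return 0
--     t = 0
--     for i in range(nol):
--         if top[i] == '#':
--             t |= 1 << i
--     b = 0
--     for i in range(nol):
--         if bot[i] == '#':
--             b |= 1 << i
--     if t & b:
--         return 0
--     o = 0
--     for i in range(1, nol - 1, 2):
--         o |= 1 << i
--     if (t & (b >> 1) | b & (t >> 1)) & o:
--         return 0
--     blocked = t | b
--     bad = blocked | blocked >> 1
--     free = o ^ (o & bad)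
--     return pow(2, free.bit_count(), 1000000007)
-- ===== Notes on version B (the rewrite author's own statement) =====
-- stated objective: alternative
-- what changed: Replaces A's per-column accumulator while-loop by a bit-parallel algorithm: the '#' cells of the top and bottom rows are packed into integer bitmasks, column conflicts, cross conflicts and the free-pair count are then evaluated by whole-word bitwise expressions (AND/OR/XOR/shift and a popcount), and the result is the closed-form pow(2, popcount, 1000000007).
-- outside the precondition, e.g. on let_it_flow(['#', 'x'], -2): A returns 0, B raises IndexError; on let_it_flow(['#', 'x', '#'], 2): A returns 0, B returns 0
import Mathlib
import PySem

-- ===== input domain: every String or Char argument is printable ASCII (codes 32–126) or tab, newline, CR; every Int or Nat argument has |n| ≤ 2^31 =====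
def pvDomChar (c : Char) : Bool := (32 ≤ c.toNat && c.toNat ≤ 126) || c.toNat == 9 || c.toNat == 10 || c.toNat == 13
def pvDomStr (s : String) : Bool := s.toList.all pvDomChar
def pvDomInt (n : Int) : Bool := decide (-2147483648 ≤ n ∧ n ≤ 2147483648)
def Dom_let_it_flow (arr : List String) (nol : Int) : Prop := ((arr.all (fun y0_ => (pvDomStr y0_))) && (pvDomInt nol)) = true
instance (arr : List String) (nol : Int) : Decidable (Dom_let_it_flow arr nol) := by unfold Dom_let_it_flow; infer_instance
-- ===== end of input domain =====

-- B replaces A's per-column accumulator loop by a bit-parallel computation: the '#' cells of the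
-- top and bottom rows are packed into integer bitmasks, every conflict test becomes one whole-word
-- bitwise expression, and the answer is 2^(popcount of the free-pair mask) mod 1000000007;
-- equivalence is about the return value only (neither version mutates its arguments).

-- shared indexing helpers (Python arr[i] / s[i] semantics, defaults never reached inside Pre_)
def pvRow (arr : List String) (i : Int) : String := (PySem.List.pyGet? arr i).getD ""
def pvChar (s : String) (i : Int) : Char := (PySem.Str.pyGet? s i).getD ' '

-- ===== PORT A =====
-- 'for idx in range(nol): if arr[0][idx] == arr[2][idx] == '#': return 0' (early return)
def letA_colCheck (r0 r2 : String) : List Int → Bool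
  | [] => false
  | i :: rest =>
      if (pvChar r0 i == pvChar r2 i) && (pvChar r2 i == '#') then true
      else letA_colCheck r0 r2 rest

-- the 'while idx < nol - 1: … idx += 2' accumulator loop with its early returns
def letA_loop (r0 r2 : String) (nol idx count : Int) : Int :=
  if h : idx < nol - 1 then
    if (pvChar r0 idx == '#') && (pvChar r2 (idx + 1) == '#') then 0
    else if (pvChar r2 idx == '#') && (pvChar r0 (idx + 1) == '#') then 0
    else
      let count' :=
        if (pvChar r0 idx == '#') || (pvChar r2 idx == '#') ||
           (pvChar r0 (idx + 1) == '#') || (pvChar r2 (idx + 1) == '#')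
        then count else count * 2
      letA_loop r0 r2 nol (idx + 2) (PySem.Int.mod count' 1000000007)
  else count
termination_by (nol - 1 - idx).toNat
decreasing_by omega

def let_it_flow (arr : List String) (nol : Int) : Int :=
  if PySem.Int.mod nol 2 == 1 then 0
  else if PySem.Str.isIn "#" (pvRow arr 1) then 0
  else if letA_colCheck (pvRow arr 0) (pvRow arr 2) (PySem.List.pyRange 0 nol 1) then 0
  else if (pvChar (pvRow arr 0) 0 == '#') || (pvChar (pvRow arr 1) 0 == '#') then 0
  else if decide (2 ≤ nol) &&
          ((pvChar (pvRow arr 1) (-1) == '#') || (pvChar (pvRow arr 2) (-1) == '#')) then 0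
  else letA_loop (pvRow arr 0) (pvRow arr 2) nol 1 1

-- ===== PORT B =====
-- 't = 0; for i in range(n): if row[i] == '#': t |= 1 << i'  (i ≥ 0 on the range, so '1 << i' is '1 <<< i.toNat')
def letB_mask (row : String) (n : Int) : Int :=
  (PySem.List.pyRange 0 n 1).foldl
    (fun m i => if pvChar row i == '#' then PySem.Int.bor m ((1 : Int) <<< i.toNat) else m) 0

-- 'o = 0; for i in range(1, nol - 1, 2): o |= 1 << i'
def letB_omask (nol : Int) : Int :=
  (PySem.List.pyRange 1 (nol - 1) 2).foldl
    (fun m i => PySem.Int.bor m ((1 : Int) <<< i.toNat)) 0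

def let_it_flow_alt (arr : List String) (nol : Int) : Int :=
  if PySem.Int.mod nol 2 == 1 then 0
  else if PySem.Str.isIn "#" (pvRow arr 1) then 0
  else
    let top := pvRow arr 0
    let mid := pvRow arr 1
    let bot := pvRow arr 2
    if (pvChar top 0 == '#') || (pvChar mid 0 == '#') then 0
    else if decide (2 ≤ nol) && ((pvChar mid (-1) == '#') || (pvChar bot (-1) == '#')) then 0
    else
      let t := letB_mask top nol
      let b := letB_mask bot nol
      if PySem.Int.band t b ≠ 0 then 0
      else
        let o := letB_omask nol
        if PySem.Int.band
            (PySem.Int.bor (PySem.Int.band t (b >>> 1)) (PySem.Int.band b (t >>> 1))) o ≠ 0 then 0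
        else
          let blocked := PySem.Int.bor t b
          let bad := PySem.Int.bor blocked (blocked >>> 1)
          let free := PySem.Int.bxor o (PySem.Int.band o bad)
          PySem.Int.powMod 2 (PySem.Int.bitCount free) 1000000007

-- ===== PRECONDITION & SPEC =====
-- Pre_ = the inputs on which the Python A returns: any odd nol (first guard); any arr with at
-- least 2 rows whose middle row contains '#' (second guard, short-circuits); a proper grid of
-- ≥ 3 rows each of length ≥ nol ≥ 1; or nol ≤ 0 even with ≥ 3 rows whose first two rows are
-- nonempty (only positions [0] are read).  It excludes inputs where A usually raises IndexError
-- but can still return through an early guard that fires before the first bad index (e.g. a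
-- 2-row arr with nol ≤ 0, or rows shorter than nol with an early '#'-column conflict) — those
-- values are accidents of A's check order.
def Pre_let_it_flow (arr : List String) (nol : Int) : Prop :=
  PySem.Int.mod nol 2 = 1
  ∨ (2 ≤ arr.length ∧ PySem.Str.isIn "#" ((PySem.List.pyGet? arr 1).getD "") = true)
  ∨ (3 ≤ arr.length ∧ 1 ≤ nol
      ∧ nol ≤ PySem.Str.len ((PySem.List.pyGet? arr 0).getD "")
      ∧ nol ≤ PySem.Str.len ((PySem.List.pyGet? arr 1).getD "")
      ∧ nol ≤ PySem.Str.len ((PySem.List.pyGet? arr 2).getD ""))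
  ∨ (PySem.Int.mod nol 2 = 0 ∧ nol ≤ 0 ∧ 3 ≤ arr.length
      ∧ 1 ≤ PySem.Str.len ((PySem.List.pyGet? arr 0).getD "")
      ∧ 1 ≤ PySem.Str.len ((PySem.List.pyGet? arr 1).getD ""))
instance (arr : List String) (nol : Int) : Decidable (Pre_let_it_flow arr nol) := by
  unfold Pre_let_it_flow; infer_instance

def pvWitness_let_it_flow : List String × Int := (["..", "..", ".."], 2)

def Spec_let_it_flow (arr : List String) (nol : Int) (out : Int) : Prop := out = let_it_flow_alt arr nol
instance (arr : List String) (nol : Int) (out : Int) : Decidable (Spec_let_it_flow arr nol out) := by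
  unfold Spec_let_it_flow; infer_instance

-- ===== CLAIM (what is proved, stated in full; the proofs are below) =====
def Claim_equal_let_it_flow : Prop := ∀ (arr : List String) (nol : Int), Dom_let_it_flow arr nol → Pre_let_it_flow arr nol → Spec_let_it_flow arr nol (let_it_flow arr nol)

-- ===== LEMMAS AND PROOFS =====

lemma pyRange_two_nil (a b : Int) (h : b ≤ a) : PySem.List.pyRange a b 2 = [] := by
  rw [PySem.List.pyRange_of_pos a b (by norm_num)]
  simp [if_neg (not_lt.2 h)]

lemma pyRange_two_cons (a b : Int) (h : a < b) :
    PySem.List.pyRange a b 2 = a :: PySem.List.pyRange (a + 2) b 2 := by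
  rw [PySem.List.pyRange_of_pos a b (by norm_num), PySem.List.pyRange_of_pos (a+2) b (by norm_num)]
  rw [if_pos h]
  by_cases h2 : a + 2 < b
  · rw [if_pos h2]
    have hn : ((b - a + 2 - 1) / 2).toNat = ((b - (a+2) + 2 - 1) / 2).toNat + 1 := by omega
    rw [hn, List.range_succ_eq_map]
    simp [List.map_map, Function.comp_def]
    intro k _; ring
  · rw [if_neg h2]
    have hn : ((b - a + 2 - 1) / 2).toNat = 1 := by omega
    rw [hn]
    simp

-- A's chained comparison 'x == y == "#"' is the conjunction of the two '#' tests
lemma chain_eq (x y : Char) : ((x == y) && (y == '#')) = ((x == '#') && (y == '#')) := by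
  by_cases h2 : y = '#'
  · subst h2; by_cases h1 : x = '#' <;> simp [h1]
  · have : (y == '#') = false := by simp [h2]
    simp [this]

lemma colCheck_eq_any (r0 r2 : String) (l : List Int) :
    letA_colCheck r0 r2 l = l.any (fun i => (pvChar r0 i == '#') && (pvChar r2 i == '#')) := by
  induction l with
  | nil => rfl
  | cons i rest ih =>
      rw [letA_colCheck, List.any_cons, ← ih, chain_eq]
      by_cases h : ((pvChar r0 i == '#') && (pvChar r2 i == '#')) = true <;> simp [h]

lemma modmul (x y : Int) : (x % 1000000007) * y % 1000000007 = x * y % 1000000007 := by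
  conv_rhs => rw [Int.mul_emod]
  rw [Int.mul_emod (x % 1000000007), Int.emod_emod_of_dvd _ dvd_rfl]

lemma loop_eq_aux (r0 r2 : String) (nol : Int) (n : Nat) :
    ∀ (idx count : Int), (nol - 1 - idx).toNat ≤ n → 0 ≤ count → count < 1000000007 →
    letA_loop r0 r2 nol idx count =
      (if (PySem.List.pyRange idx (nol - 1) 2).any (fun i =>
            ((pvChar r0 i == '#') && (pvChar r2 (i + 1) == '#')) ||
            ((pvChar r2 i == '#') && (pvChar r0 (i + 1) == '#'))) then 0
      else (count * 2 ^ ((PySem.List.pyRange idx (nol - 1) 2).filter (fun i =>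
            (pvChar r0 i != '#') && (pvChar r2 i != '#') &&
            (pvChar r0 (i + 1) != '#') && (pvChar r2 (i + 1) != '#'))).length) % 1000000007) := by
  induction n with
  | zero =>
      intro idx count hle h0 h1
      have h : ¬ idx < nol - 1 := by omega
      rw [letA_loop, dif_neg h, pyRange_two_nil idx (nol-1) (by omega)]
      simp [Int.emod_eq_of_lt h0 h1]
  | succ n ih =>
      intro idx count hle h0 h1
      by_cases h : idx < nol - 1
      · rw [letA_loop, dif_pos h, pyRange_two_cons idx (nol-1) h]
        rw [List.any_cons, List.filter_cons]
        by_cases hc1 : ((pvChar r0 idx == '#') && (pvChar r2 (idx+1) == '#')) = true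
        · simp [hc1]
        · by_cases hc2 : ((pvChar r2 idx == '#') && (pvChar r0 (idx+1) == '#')) = true
          · simp [hc1, hc2]
          · simp only [hc1, hc2]
            have hM : (0:Int) < 1000000007 := by norm_num
            have hrec := ih (idx + 2)
              (PySem.Int.mod (if (pvChar r0 idx == '#') || (pvChar r2 idx == '#') ||
                 (pvChar r0 (idx + 1) == '#') || (pvChar r2 (idx + 1) == '#')
                 then count else count * 2) 1000000007)
              (by omega) (PySem.Int.mod_nonneg _ hM) (PySem.Int.mod_lt _ hM)
            rw [hrec, PySem.Int.mod_eq_emod_of_pos hM]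
            simp only [Bool.false_eq_true, if_false, Bool.false_or]
            by_cases hany : ((PySem.List.pyRange (idx+2) (nol - 1) 2).any (fun i =>
                ((pvChar r0 i == '#') && (pvChar r2 (i + 1) == '#')) ||
                ((pvChar r2 i == '#') && (pvChar r0 (i + 1) == '#')))) = true
            · rw [if_pos hany, if_pos hany]
            · rw [if_neg hany, if_neg hany]
              have hfree : ((pvChar r0 idx != '#') && (pvChar r2 idx != '#') &&
                  (pvChar r0 (idx + 1) != '#') && (pvChar r2 (idx + 1) != '#'))
                  = !((pvChar r0 idx == '#') || (pvChar r2 idx == '#') ||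
                      (pvChar r0 (idx + 1) == '#') || (pvChar r2 (idx + 1) == '#')) := by
                cases e0 : (pvChar r0 idx == '#') <;> cases e1 : (pvChar r2 idx == '#') <;>
                  cases e2 : (pvChar r0 (idx+1) == '#') <;> cases e3 : (pvChar r2 (idx+1) == '#') <;>
                    simp [bne, e0, e1, e2, e3]
              rw [hfree]
              by_cases hd : ((pvChar r0 idx == '#') || (pvChar r2 idx == '#') ||
                  (pvChar r0 (idx + 1) == '#') || (pvChar r2 (idx + 1) == '#')) = true
              · rw [if_pos hd, hd]
                simp only [Bool.not_true, Bool.false_eq_true, if_false]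
                exact modmul _ _
              · have hd' := Bool.eq_false_iff.mpr hd
                rw [if_neg hd, hd']
                simp only [Bool.not_false, if_true, List.length_cons, pow_succ]
                rw [modmul]
                ring_nf
      · rw [letA_loop, dif_neg h, pyRange_two_nil idx (nol-1) (by omega)]
        simp [Int.emod_eq_of_lt h0 h1]

-- ---------- B-side: Nat twins of the masks and their bit characterisations ----------

def mlistN (l : List Int) : Nat := l.foldl (fun m i => m ||| (1 <<< i.toNat)) 0

lemma one_shl_cast (n : Nat) : (1:Int) <<< n = ((1 <<< n : Nat) : Int) :=
  Int.mem_toNat?.mp rfl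

lemma one_shl_cast' (n : Nat) : (1:Int) <<< ((n : Int)) = ((1 <<< n : Nat) : Int) := by
  exact_mod_cast Int.shiftLeft_natCast 1 n

def bmaskN (row : String) (n : Int) : Nat :=
  (PySem.List.pyRange 0 n 1).foldl
    (fun m i => if pvChar row i == '#' then m ||| (1 <<< i.toNat) else m) 0

lemma letB_mask_cast (row : String) (n : Int) : letB_mask row n = (bmaskN row n : Int) := by
  unfold letB_mask bmaskN
  suffices h : ∀ (l : List Int) (a : Nat),
      l.foldl (fun m i => if pvChar row i == '#' then PySem.Int.bor m ((1 : Int) <<< i.toNat) else m) (a : Int)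
        = ((l.foldl (fun m i => if pvChar row i == '#' then m ||| (1 <<< i.toNat) else m) a : Nat) : Int) by
    exact h _ 0
  intro l
  induction l with
  | nil => intro a; rfl
  | cons i rest ih =>
      intro a
      simp only [List.foldl_cons]
      by_cases hc : (pvChar row i == '#') = true
      · rw [if_pos hc, if_pos hc]
        rw [one_shl_cast i.toNat, PySem.Int.bor_natCast]
        exact ih _
      · rw [if_neg hc, if_neg hc]; exact ih _

lemma letB_omask_cast (nol : Int) :
    letB_omask nol = (mlistN (PySem.List.pyRange 1 (nol - 1) 2) : Int) := by
  unfold letB_omask mlistN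
  suffices h : ∀ (l : List Int) (a : Nat),
      l.foldl (fun m i => PySem.Int.bor m ((1 : Int) <<< i.toNat)) (a : Int)
        = ((l.foldl (fun m i => m ||| (1 <<< i.toNat)) a : Nat) : Int) by
    exact h _ 0
  intro l
  induction l with
  | nil => intro a; rfl
  | cons i rest ih =>
      intro a
      simp only [List.foldl_cons]
      rw [one_shl_cast' i.toNat, PySem.Int.bor_natCast]
      exact ih _

lemma testBit_foldl_or (f : Int → Bool) (l : List Int) (hl : ∀ i ∈ l, 0 ≤ i) (a : Nat) (j : Nat) :
    (l.foldl (fun m i => if f i then m ||| (1 <<< i.toNat) else m) a).testBit j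
      = (a.testBit j || l.any (fun i => f i && (i == (j : Int)))) := by
  induction l generalizing a with
  | nil => simp
  | cons i rest ih =>
      have hi : 0 ≤ i := hl i (by simp)
      have hrest : ∀ x ∈ rest, 0 ≤ x := fun x hx => hl x (by simp [hx])
      simp only [List.foldl_cons, List.any_cons]
      rw [ih hrest]
      by_cases hc : f i = true
      · rw [if_pos hc, hc]
        rw [Nat.testBit_lor]
        have h1 : (1 <<< i.toNat) = 2 ^ i.toNat := by rw [Nat.shiftLeft_eq, one_mul]
        rw [h1, Nat.testBit_two_pow]
        have : (decide (i.toNat = j)) = (i == (j : Int)) := by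
          by_cases he : i = (j : Int)
          · subst he; simp [Int.toNat_of_nonneg hi]
          · have : ¬ i.toNat = j := by omega
            simp [this, he]
        rw [this]
        cases (i == (j : Int)) <;> simp [Bool.or_comm]
      · rw [if_neg hc]
        have : (f i && (i == (j : Int))) = false := by rw [Bool.eq_false_iff.mpr hc]; simp
        rw [this]
        simp

lemma any_beq_eq (g : Int → Bool) (l : List Int) (c : Int) :
    l.any (fun i => g i && (i == c)) = (decide (c ∈ l) && g c) := by
  induction l with
  | nil => simp
  | cons i rest ih =>
      rw [List.any_cons, ih]
      by_cases he : i = c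
      · subst he
        simp only [List.mem_cons, true_or, decide_true, Bool.true_and, beq_self_eq_true,
          Bool.and_true]
        cases g i <;> simp
      · have h1 : (i == c) = false := by simp [he]
        have h2 : decide (c = i) = false := by
          simp only [decide_eq_false_iff_not]
          exact fun h => he h.symm
        simp [h1, h2]

lemma testBit_mlistN (l : List Int) (hl : ∀ i ∈ l, 0 ≤ i) (j : Nat) :
    (mlistN l).testBit j = decide ((j : Int) ∈ l) := by
  unfold mlistN
  have h : (l.foldl (fun m i => m ||| (1 <<< i.toNat)) 0)
      = (l.foldl (fun m i => if (fun _ => true) i then m ||| (1 <<< i.toNat) else m) 0) := by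
    simp
  rw [h, testBit_foldl_or _ l hl 0 j, any_beq_eq (fun _ => true) l (j : Int)]
  simp

lemma testBit_bmaskN (row : String) (n : Int) (j : Nat) :
    (bmaskN row n).testBit j = (decide ((j : Int) < n) && (pvChar row (j : Int) == '#')) := by
  unfold bmaskN
  rw [testBit_foldl_or _ _ (fun i hi => ((PySem.List.mem_pyRange_one).mp hi).1) 0 j]
  rw [any_beq_eq]
  have : decide ((j : Int) ∈ PySem.List.pyRange 0 n 1) = decide ((j : Int) < n) := by
    simp [PySem.List.mem_pyRange_one]
  rw [this]
  simp [Bool.and_comm]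

lemma mem_pyRange_two (a b x : Int) :
    x ∈ PySem.List.pyRange a b 2 ↔ a ≤ x ∧ x < b ∧ 2 ∣ x - a :=
  PySem.List.mem_pyRange_iff_of_pos (by norm_num) x

-- a nonzero Nat has a set bit; zero has none
lemma ne_zero_iff_testBit (x : Nat) : x ≠ 0 ↔ ∃ j, x.testBit j = true := by
  constructor
  · intro h
    obtain ⟨i, hi, _⟩ := Nat.exists_most_significant_bit h
    exact ⟨i, hi⟩
  · rintro ⟨j, hj⟩ rfl
    simp at hj

lemma mlistN_lt (l : List Int) (c : Nat) (h : ∀ i ∈ l, 0 ≤ i ∧ i < (c : Int)) :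
    mlistN l < 2 ^ c := by
  unfold mlistN
  suffices hgen : ∀ (a : Nat), a < 2 ^ c → l.foldl (fun m i => m ||| (1 <<< i.toNat)) a < 2 ^ c by
    exact hgen 0 (Nat.two_pow_pos c)
  induction l with
  | nil => intro a ha; simpa using ha
  | cons i rest ih =>
      intro a ha
      simp only [List.foldl_cons]
      have hi := h i (by simp)
      have : (1 <<< i.toNat) < 2 ^ c := by
        rw [Nat.shiftLeft_eq, one_mul]
        exact Nat.pow_lt_pow_right (by norm_num) (by omega)
      exact ih (fun x hx => h x (by simp [hx])) _ (Nat.or_lt_two_pow ha this)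

lemma bitCount_halve (m : Nat) :
    PySem.Int.bitCount (m : Int) = m % 2 + PySem.Int.bitCount ((m / 2 : Nat) : Int) := by
  rcases Nat.eq_zero_or_pos m with h | h
  · subst h; simp [PySem.Int.bitCount_zero]
  · exact PySem.Int.bitCount_natCast h

lemma bitCount_lor_two_pow (a : Nat) :
    ∀ (m : Nat), m < 2 ^ a →
      PySem.Int.bitCount ((m ||| 2 ^ a : Nat) : Int) = PySem.Int.bitCount (m : Int) + 1 := by
  induction a with
  | zero =>
      intro m hm
      have : m = 0 := by omega
      subst this
      simp only [Nat.zero_or, pow_zero, Nat.cast_one]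
      decide
  | succ a ih =>
      intro m hm
      have hx : (m ||| 2 ^ (a + 1)) % 2 = m % 2 := by
        have h0 : (m ||| 2 ^ (a + 1)).testBit 0 = m.testBit 0 := by
          rw [Nat.testBit_lor]
          have : (2 ^ (a + 1)).testBit 0 = false := by
            rw [Nat.testBit_two_pow]; simp
          rw [this]; simp
        simp only [Nat.testBit_zero, decide_eq_decide] at h0
        omega
      have hdiv : (m ||| 2 ^ (a + 1)) / 2 = m / 2 ||| 2 ^ a := by
        have hsr1 : ∀ x : Nat, x >>> 1 = x / 2 := fun x => by
          simp [Nat.shiftRight_eq_div_pow]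
        rw [← hsr1, ← hsr1]
        apply Nat.eq_of_testBit_eq
        intro j
        rw [Nat.testBit_shiftRight, Nat.testBit_lor, Nat.testBit_lor, Nat.testBit_shiftRight]
        congr 1
        rw [Nat.testBit_two_pow, Nat.testBit_two_pow]
        by_cases h : a = j <;> simp [h] <;> omega
      rw [bitCount_halve (m ||| 2 ^ (a + 1)), hx, hdiv,
        ih (m / 2) (by omega), bitCount_halve m]
      omega

lemma bitCount_mlistN (l : List Int) :
    l.Pairwise (· < ·) → (∀ i ∈ l, 0 ≤ i) →
    PySem.Int.bitCount ((mlistN l : Nat) : Int) = l.length := by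
  induction l using List.reverseRecOn with
  | nil => intro _ _; simp [mlistN, PySem.Int.bitCount_zero]
  | append_singleton l i ih =>
      intro hp hnn
      have hp' : l.Pairwise (· < ·) := (List.pairwise_append.mp hp).1
      have hlt : ∀ x ∈ l, x < i := fun x hx =>
        (List.pairwise_append.mp hp).2.2 x hx i (by simp)
      have hnn' : ∀ x ∈ l, 0 ≤ x := fun x hx => hnn x (by simp [hx])
      have hi : 0 ≤ i := hnn i (by simp)
      have hml : mlistN (l ++ [i]) = mlistN l ||| 2 ^ i.toNat := by
        unfold mlistN
        rw [List.foldl_append]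
        simp [Nat.shiftLeft_eq]
      have hlt2 : mlistN l < 2 ^ i.toNat := by
        apply mlistN_lt
        intro x hx
        exact ⟨hnn' x hx, by have := hlt x hx; omega⟩
      rw [hml, bitCount_lor_two_pow i.toNat (mlistN l) hlt2, ih hp' hnn']
      simp

lemma pairwise_pyRange_two (a b : Int) : (PySem.List.pyRange a b 2).Pairwise (· < ·) := by
  rw [PySem.List.pyRange_of_pos a b (by norm_num)]
  by_cases h : a < b
  · rw [if_pos h]
    apply List.pairwise_map.mpr
    have := List.pairwise_lt_range (n := ((b - a + 2 - 1) / 2).toNat)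
    apply List.Pairwise.imp _ this
    intro x y hxy
    omega
  · rw [if_neg h]; simp

-- ---------- the three condition equivalences ----------

lemma cond1_iff (top bot : String) (nol : Int) :
    PySem.Int.band (letB_mask top nol) (letB_mask bot nol) ≠ 0 ↔
    (PySem.List.pyRange 0 nol 1).any
      (fun i => (pvChar top i == '#') && (pvChar bot i == '#')) = true := by
  rw [letB_mask_cast, letB_mask_cast, PySem.Int.band_natCast]
  rw [ne_eq, Int.natCast_eq_zero, ← ne_eq, ne_zero_iff_testBit]
  constructor
  · rintro ⟨j, hj⟩
    rw [Nat.testBit_land, testBit_bmaskN, testBit_bmaskN] at hj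
    simp only [Bool.and_eq_true, decide_eq_true_eq] at hj
    rw [List.any_eq_true]
    exact ⟨(j : Int), PySem.List.mem_pyRange_one.mpr ⟨by positivity, hj.1.1⟩,
      by simp [hj.1.2, hj.2.2]⟩
  · intro h
    rw [List.any_eq_true] at h
    obtain ⟨i, hmem, hpred⟩ := h
    obtain ⟨h0, hn⟩ := PySem.List.mem_pyRange_one.mp hmem
    refine ⟨i.toNat, ?_⟩
    rw [Nat.testBit_land, testBit_bmaskN, testBit_bmaskN, Int.toNat_of_nonneg h0]
    simp only [Bool.and_eq_true, decide_eq_true_eq] at hpred ⊢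
    exact ⟨⟨hn, hpred.1⟩, hn, hpred.2⟩

lemma cond2_iff (top bot : String) (nol : Int) :
    PySem.Int.band
      (PySem.Int.bor (PySem.Int.band (letB_mask top nol) ((letB_mask bot nol) >>> 1))
        (PySem.Int.band (letB_mask bot nol) ((letB_mask top nol) >>> 1))) (letB_omask nol) ≠ 0 ↔
    (PySem.List.pyRange 1 (nol - 1) 2).any (fun i =>
      ((pvChar top i == '#') && (pvChar bot (i + 1) == '#')) ||
      ((pvChar bot i == '#') && (pvChar top (i + 1) == '#'))) = true := by
  rw [letB_mask_cast, letB_mask_cast, letB_omask_cast]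
  have hsr : ∀ m : Nat, ((m : Int) >>> (1 : Int)) = ((m >>> 1 : Nat) : Int) := by
    intro m; exact Int.mem_toNat?.mp rfl
  rw [hsr, hsr, PySem.Int.band_natCast, PySem.Int.band_natCast, PySem.Int.bor_natCast,
    PySem.Int.band_natCast]
  rw [ne_eq, Int.natCast_eq_zero, ← ne_eq, ne_zero_iff_testBit]
  have hrange_nonneg : ∀ i ∈ PySem.List.pyRange 1 (nol - 1) 2, (0:Int) ≤ i := by
    intro i hi; have := (mem_pyRange_two 1 (nol - 1) i).mp hi; omega
  constructor
  · rintro ⟨j, hj⟩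
    rw [Nat.testBit_land, Nat.testBit_lor, Nat.testBit_land, Nat.testBit_land,
      Nat.testBit_shiftRight, Nat.testBit_shiftRight,
      testBit_bmaskN, testBit_bmaskN, testBit_bmaskN, testBit_bmaskN,
      testBit_mlistN _ hrange_nonneg] at hj
    simp only [Bool.and_eq_true, Bool.or_eq_true, decide_eq_true_eq] at hj
    obtain ⟨hor, hmem⟩ := hj
    rw [List.any_eq_true]
    refine ⟨(j : Int), hmem, ?_⟩
    have hc : ((1 + j : Nat) : Int) = (j : Int) + 1 := by push_cast; ring
    simp only [Bool.or_eq_true, Bool.and_eq_true]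
    rcases hor with ⟨⟨_, h1⟩, ⟨_, h2⟩⟩ | ⟨⟨_, h1⟩, ⟨_, h2⟩⟩
    · exact Or.inl ⟨h1, by rw [← hc]; exact h2⟩
    · exact Or.inr ⟨h1, by rw [← hc]; exact h2⟩
  · intro h
    rw [List.any_eq_true] at h
    obtain ⟨i, hmem, hpred⟩ := h
    obtain ⟨h1, h2, _⟩ := (mem_pyRange_two 1 (nol - 1) i).mp hmem
    refine ⟨i.toNat, ?_⟩
    have hti : ((i.toNat : Nat) : Int) = i := Int.toNat_of_nonneg (by omega)
    rw [Nat.testBit_land, Nat.testBit_lor, Nat.testBit_land, Nat.testBit_land,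
      Nat.testBit_shiftRight, Nat.testBit_shiftRight,
      testBit_bmaskN, testBit_bmaskN, testBit_bmaskN, testBit_bmaskN,
      testBit_mlistN _ hrange_nonneg, hti]
    have hc : ((1 + i.toNat : Nat) : Int) = i + 1 := by push_cast; omega
    rw [hc]
    simp only [Bool.or_eq_true, Bool.and_eq_true, decide_eq_true_eq] at hpred ⊢
    have hb1 : i < nol := by omega
    have hb2 : i + 1 < nol := by omega
    rcases hpred with ⟨ha, hb⟩ | ⟨ha, hb⟩
    · exact ⟨Or.inl ⟨⟨hb1, ha⟩, hb2, hb⟩, hmem⟩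
    · exact ⟨Or.inr ⟨⟨hb1, ha⟩, hb2, hb⟩, hmem⟩

lemma free_count (top bot : String) (nol : Int) :
    PySem.Int.bitCount
      (PySem.Int.bxor (letB_omask nol)
        (PySem.Int.band (letB_omask nol)
          (PySem.Int.bor (PySem.Int.bor (letB_mask top nol) (letB_mask bot nol))
            ((PySem.Int.bor (letB_mask top nol) (letB_mask bot nol)) >>> 1)))) =
    ((PySem.List.pyRange 1 (nol - 1) 2).filter (fun i =>
        (pvChar top i != '#') && (pvChar bot i != '#') &&
        (pvChar top (i + 1) != '#') && (pvChar bot (i + 1) != '#'))).length := by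
  rw [letB_mask_cast, letB_mask_cast, letB_omask_cast]
  have hsr : ∀ m : Nat, ((m : Int) >>> (1 : Int)) = ((m >>> 1 : Nat) : Int) := by
    intro m; exact Int.mem_toNat?.mp rfl
  rw [PySem.Int.bor_natCast, hsr, PySem.Int.bor_natCast, PySem.Int.band_natCast,
    PySem.Int.bxor_natCast]
  set l := PySem.List.pyRange 1 (nol - 1) 2 with hl
  set p := (fun i : Int =>
      (pvChar top i != '#') && (pvChar bot i != '#') &&
      (pvChar top (i + 1) != '#') && (pvChar bot (i + 1) != '#')) with hp
  have hrange_nonneg : ∀ i ∈ l, (0:Int) ≤ i := by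
    intro i hi; have := (mem_pyRange_two 1 (nol - 1) i).mp hi; omega
  have hfilter_nonneg : ∀ i ∈ l.filter p, (0:Int) ≤ i := by
    intro i hi; exact hrange_nonneg i (List.mem_of_mem_filter hi)
  have hmask_eq : (mlistN l ^^^
      (mlistN l &&& (bmaskN top nol ||| bmaskN bot nol |||
        (bmaskN top nol ||| bmaskN bot nol) >>> 1))) = mlistN (l.filter p) := by
    apply Nat.eq_of_testBit_eq
    intro j
    rw [Nat.testBit_xor, Nat.testBit_land, testBit_mlistN l hrange_nonneg,
      testBit_mlistN _ hfilter_nonneg]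
    by_cases hmem : (j : Int) ∈ l
    · have hb := (mem_pyRange_two 1 (nol - 1) (j : Int)).mp (hl ▸ hmem)
      have hb1 : ((j : Int)) < nol := by omega
      have hb2 : ((j : Int)) + 1 < nol := by omega
      have hc : ((1 + j : Nat) : Int) = (j : Int) + 1 := by push_cast; ring
      rw [Nat.testBit_lor, Nat.testBit_lor, Nat.testBit_shiftRight, Nat.testBit_lor,
        testBit_bmaskN, testBit_bmaskN, testBit_bmaskN, testBit_bmaskN, hc]
      have hmem' : decide ((j : Int) ∈ l) = true := by simp [hmem]
      rw [hmem']
      have hjl : ((j:Int) ∈ l.filter p) ↔ p (j : Int) = true := by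
        rw [List.mem_filter]; exact ⟨fun h => h.2, fun h => ⟨hmem, h⟩⟩
      rw [decide_eq_true_eq] at *
      have hd1 : decide ((j : Int) < nol) = true := by simp [hb1]
      have hd2 : decide ((j : Int) + 1 < nol) = true := by simp [hb2]
      rw [hd1, hd2]
      simp only [Bool.true_and, Bool.true_xor]
      rw [hp]
      by_cases hjf : ((j:Int) ∈ l.filter p)
      · have hpj := hjl.mp hjf
        rw [hp] at hpj
        simp only [Bool.and_eq_true, bne_iff_ne, ne_eq] at hpj
        have e1 : (pvChar top (j:Int) == '#') = false := by simp [hpj.1.1.1]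
        have e2 : (pvChar bot (j:Int) == '#') = false := by simp [hpj.1.1.2]
        have e3 : (pvChar top ((j:Int) + 1) == '#') = false := by simp [hpj.1.2]
        have e4 : (pvChar bot ((j:Int) + 1) == '#') = false := by simp [hpj.2]
        rw [e1, e2, e3, e4]
        simp
        exact ⟨hmem, hpj⟩
      · have hpj : ¬ p (j:Int) = true := fun h => hjf (hjl.mpr h)
        rw [hp] at hpj
        simp only [Bool.and_eq_true, bne_iff_ne, ne_eq, not_and_or, not_not] at hpj
        have hor : ((pvChar top (j:Int) == '#') || (pvChar bot (j:Int) == '#') ||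
            ((pvChar top ((j:Int)+1) == '#') || (pvChar bot ((j:Int)+1) == '#'))) = true := by
          simp only [Bool.or_eq_true, beq_iff_eq]
          tauto
        have : decide ((j:Int) ∈ l.filter p) = false := by simp [hjf]
        rw [this]
        revert hor
        cases (pvChar top (j:Int) == '#') <;> cases (pvChar bot (j:Int) == '#') <;>
          cases (pvChar top ((j:Int)+1) == '#') <;> cases (pvChar bot ((j:Int)+1) == '#') <;>
            simp
    · have h1 : decide ((j : Int) ∈ l) = false := by simp [hmem]
      have h2 : decide ((j : Int) ∈ l.filter p) = false := by
        simp only [decide_eq_false_iff_not]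
        intro hc; exact hmem (List.mem_of_mem_filter hc)
      rw [h1, h2]
      simp
  rw [hmask_eq]
  rw [bitCount_mlistN (l.filter p) (List.Pairwise.filter p (hl ▸ pairwise_pyRange_two 1 (nol-1)))
    hfilter_nonneg]

-- ---------- the ports agree ----------

lemma ports_eq (arr : List String) (nol : Int) :
    let_it_flow arr nol = let_it_flow_alt arr nol := by
  unfold let_it_flow let_it_flow_alt
  by_cases hm : (PySem.Int.mod nol 2 == 1) = true
  · rw [if_pos hm, if_pos hm]
  · rw [if_neg hm, if_neg hm]
    by_cases hi : PySem.Str.isIn "#" (pvRow arr 1) = true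
    · rw [if_pos hi, if_pos hi]
    · rw [if_neg hi, if_neg hi, colCheck_eq_any]
      simp only []
      by_cases hc : ((PySem.List.pyRange 0 nol 1).any
          (fun i => (pvChar (pvRow arr 0) i == '#') && (pvChar (pvRow arr 2) i == '#'))) = true
      · -- A returns 0 at the column check; every later B branch returns 0 too
        rw [if_pos hc]
        by_cases h0 : ((pvChar (pvRow arr 0) 0 == '#') || (pvChar (pvRow arr 1) 0 == '#')) = true
        · rw [if_pos h0]
        · rw [if_neg h0]
          by_cases hb : (decide (2 ≤ nol) &&
              ((pvChar (pvRow arr 1) (-1) == '#') || (pvChar (pvRow arr 2) (-1) == '#'))) = true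
          · rw [if_pos hb]
          · rw [if_neg hb]
            rw [if_pos ((cond1_iff (pvRow arr 0) (pvRow arr 2) nol).mpr hc)]
      · rw [if_neg hc]
        by_cases h0 : ((pvChar (pvRow arr 0) 0 == '#') || (pvChar (pvRow arr 1) 0 == '#')) = true
        · rw [if_pos h0, if_pos h0]
        · rw [if_neg h0, if_neg h0]
          by_cases hb : (decide (2 ≤ nol) &&
              ((pvChar (pvRow arr 1) (-1) == '#') || (pvChar (pvRow arr 2) (-1) == '#'))) = true
          · rw [if_pos hb, if_pos hb]
          · rw [if_neg hb, if_neg hb]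
            have hnc : ¬ (PySem.Int.band (letB_mask (pvRow arr 0) nol)
                (letB_mask (pvRow arr 2) nol) ≠ 0) := by
              rw [cond1_iff]; exact hc
            rw [if_neg hnc]
            rw [loop_eq_aux (pvRow arr 0) (pvRow arr 2) nol (nol - 2).toNat 1 1
              (by omega) (by norm_num) (by norm_num)]
            by_cases hx : ((PySem.List.pyRange 1 (nol - 1) 2).any (fun i =>
                ((pvChar (pvRow arr 0) i == '#') && (pvChar (pvRow arr 2) (i + 1) == '#')) ||
                ((pvChar (pvRow arr 2) i == '#') && (pvChar (pvRow arr 0) (i + 1) == '#')))) = true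
            · rw [if_pos hx, if_pos ((cond2_iff (pvRow arr 0) (pvRow arr 2) nol).mpr hx)]
            · rw [if_neg hx]
              have hnx : ¬ (PySem.Int.band
                  (PySem.Int.bor
                    (PySem.Int.band (letB_mask (pvRow arr 0) nol) ((letB_mask (pvRow arr 2) nol) >>> 1))
                    (PySem.Int.band (letB_mask (pvRow arr 2) nol) ((letB_mask (pvRow arr 0) nol) >>> 1)))
                  (letB_omask nol) ≠ 0) := by
                rw [cond2_iff]; exact hx
              rw [if_neg hnx]
              rw [free_count (pvRow arr 0) (pvRow arr 2) nol]
              rw [PySem.Int.powMod_eq,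
                PySem.Int.mod_eq_emod_of_pos (by norm_num : (0:Int) < 1000000007), one_mul]

-- ===== VERDICT (by name: the statement is the Claim_ definition above) =====
theorem let_it_flow_spec : Claim_equal_let_it_flow := by
  intro arr nol _ _
  unfold Spec_let_it_flow
  exact ports_eq arr nol
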